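-- pv_equiv track=rewrite | github.com/shivam3164/kundali2 | backend/features/transits/special_nakshatras.py | get_nakshatra_index
-- ===== SOURCE A (Python) =====
-- NAKSHATRA_LIST = [
--     "Ashwini", "Bharani", "Krittika", "Rohini", "Mrigashira", "Ardra",
--     "Punarvasu", "Pushya", "Ashlesha", "Magha", "Purva Phalguni", "Uttara Phalguni",
--     "Hasta", "Chitra", "Swati", "Vishakha", "Anuradha", "Jyeshtha",
--     "Mula", "Purva Ashadha", "Uttara Ashadha", "Shravana", "Dhanishtha",
--     "Shatabhisha", "Purva Bhadrapada", "Uttara Bhadrapada", "Revati"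
-- ]
--
-- def get_nakshatra_index(nakshatra_name: str) -> int:
--     """Get 1-based index of nakshatra from name"""
--     try:
--         return NAKSHATRA_LIST.index(nakshatra_name) + 1
--     except ValueError:
--         # Try partial match
--         for i, nak in enumerate(NAKSHATRA_LIST):
--             if nakshatra_name.lower() in nak.lower() or nak.lower() in nakshatra_name.lower():
--                 return i + 1
--         return 0
-- ===== SOURCE B (Python) =====
-- NAKSHATRA_LIST = [
--     "Ashwini", "Bharani", "Krittika", "Rohini", "Mrigashira", "Ardra",
--     "Punarvasu", "Pushya", "Ashlesha", "Magha", "Purva Phalguni", "Uttara Phalguni",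
--     "Hasta", "Chitra", "Swati", "Vishakha", "Anuradha", "Jyeshtha",
--     "Mula", "Purva Ashadha", "Uttara Ashadha", "Shravana", "Dhanishtha",
--     "Shatabhisha", "Purva Bhadrapada", "Uttara Bhadrapada", "Revati"
-- ]
--
-- def get_nakshatra_index(nakshatra_name: str) -> int:
--     """Get 1-based index of nakshatra from name (single pass)."""
--     partial = None
--     low = nakshatra_name.lower()
--     for i, nak in enumerate(NAKSHATRA_LIST):
--         if nak == nakshatra_name:
--             return i + 1
--         if partial is None:
--             nl = nak.lower()
--             if low in nl or nl in low:
--                 partial = i + 1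
--     return partial if partial is not None else 0
-- ===== Notes on version B (the rewrite author's own statement) =====
-- stated objective: faster
-- what changed: Replaces A's two sequential scans (list.index then a separate partial-match loop) with one pass that returns immediately on an exact match and remembers the earliest partial match as a fallback, lowercasing the query once instead of twice per iteration.
import Mathlib
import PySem

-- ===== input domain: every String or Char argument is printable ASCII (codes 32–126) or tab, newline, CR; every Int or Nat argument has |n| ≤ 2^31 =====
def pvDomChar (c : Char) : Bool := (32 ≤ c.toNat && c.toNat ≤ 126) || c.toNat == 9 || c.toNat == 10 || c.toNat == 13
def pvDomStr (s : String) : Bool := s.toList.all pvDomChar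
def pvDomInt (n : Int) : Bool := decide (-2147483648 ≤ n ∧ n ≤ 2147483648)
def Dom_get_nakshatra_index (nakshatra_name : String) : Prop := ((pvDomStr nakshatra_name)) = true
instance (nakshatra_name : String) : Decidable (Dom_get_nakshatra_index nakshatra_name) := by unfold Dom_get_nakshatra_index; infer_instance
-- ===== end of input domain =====

-- B changes the decomposition: one pass with an exact-match early return and a remembered
-- earliest partial match, instead of A's list.index pass followed by a separate partial-match loop.

-- ===== PORT A =====
def NAKSHATRA_LIST : List String := [
    "Ashwini", "Bharani", "Krittika", "Rohini", "Mrigashira", "Ardra",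
    "Punarvasu", "Pushya", "Ashlesha", "Magha", "Purva Phalguni", "Uttara Phalguni",
    "Hasta", "Chitra", "Swati", "Vishakha", "Anuradha", "Jyeshtha",
    "Mula", "Purva Ashadha", "Uttara Ashadha", "Shravana", "Dhanishtha",
    "Shatabhisha", "Purva Bhadrapada", "Uttara Bhadrapada", "Revati"]

-- A's fallback loop: 'for i, nak in enumerate(NAKSHATRA_LIST): if … : return i + 1' else 0
def pvPartialA (nakshatra_name : String) : List (Int × String) → Int
  | [] => 0
  | (i, nak) :: rest =>
    if PySem.Str.isIn (PySem.Str.lower nakshatra_name) (PySem.Str.lower nak)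
       || PySem.Str.isIn (PySem.Str.lower nak) (PySem.Str.lower nakshatra_name)
    then i + 1
    else pvPartialA nakshatra_name rest

def get_nakshatra_index (nakshatra_name : String) : Int :=
  match PySem.List.index? NAKSHATRA_LIST nakshatra_name with
  | some i => (i : Int) + 1
  | none => pvPartialA nakshatra_name (PySem.List.enumerate NAKSHATRA_LIST 0)

-- ===== PORT B =====
-- B's single loop: return i+1 on exact match; otherwise remember the first partial match.
def pvScanB (nakshatra_name low : String) : List (Int × String) → Option Int → Int
  | [], p => p.getD 0
  | (i, nak) :: rest, p =>
    if nak == nakshatra_name then i + 1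
    else
      pvScanB nakshatra_name low rest
        (match p with
         | some v => some v
         | none =>
           let nl := PySem.Str.lower nak
           if PySem.Str.isIn low nl || PySem.Str.isIn nl low then some (i + 1) else none)

def get_nakshatra_index_alt (nakshatra_name : String) : Int :=
  pvScanB nakshatra_name (PySem.Str.lower nakshatra_name)
    (PySem.List.enumerate NAKSHATRA_LIST 0) none


-- ===== PRECONDITION & SPEC =====
def Spec_get_nakshatra_index (nakshatra_name : String) (out : Int) : Prop := out = get_nakshatra_index_alt nakshatra_name
instance (nakshatra_name : String) (out : Int) : Decidable (Spec_get_nakshatra_index nakshatra_name out) := by unfold Spec_get_nakshatra_index; infer_instance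

-- ===== CLAIM (what is proved, stated in full; the proofs are below) =====
def Claim_equal_get_nakshatra_index : Prop := ∀ (nakshatra_name : String), Dom_get_nakshatra_index nakshatra_name → Spec_get_nakshatra_index nakshatra_name (get_nakshatra_index nakshatra_name)

-- ===== LEMMAS AND PROOFS =====
theorem pv_scan_eq (name : String) (l : List String) : ∀ (k : Int) (p : Option Int),
    pvScanB name (PySem.Str.lower name) (PySem.List.enumerate l k) p =
      match PySem.List.index? l name with
      | some j => k + (j : Int) + 1
      | none => p.getD (pvPartialA name (PySem.List.enumerate l k)) := by
  induction l with
  | nil =>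
    intro k p
    rw [(PySem.List.index?_eq_none_iff [] name).mpr (List.not_mem_nil)]
    simp [pvScanB, pvPartialA, PySem.List.enumerate]
  | cons x xs ih =>
    intro k p
    have henum : PySem.List.enumerate (x :: xs) k = (k, x) :: PySem.List.enumerate xs (k + 1) := rfl
    rw [henum]
    by_cases hx : x = name
    · subst hx
      rw [PySem.List.index?_cons_self]
      simp [pvScanB]
    · have hne : (x == name) = false := by simp [hx]
      rw [PySem.List.index?_cons_of_ne xs hx]
      simp only [pvScanB, hne, if_false, Bool.false_eq_true]
      rw [ih]
      cases hidx : PySem.List.index? xs name with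
      | some j =>
        simp only [hidx, Option.map_some]
        push_cast
        ring
      | none =>
        simp only [hidx, Option.map_none]
        cases p with
        | some v => simp
        | none =>
          simp only [pvPartialA, Option.getD_none]
          split_ifs with hc <;> rfl

-- ===== VERDICT (by name: the statement is the Claim_ definition above) =====
theorem get_nakshatra_index_spec : Claim_equal_get_nakshatra_index := by
  intro name _
  unfold Spec_get_nakshatra_index get_nakshatra_index get_nakshatra_index_alt
  rw [pv_scan_eq]
  cases hidx : PySem.List.index? NAKSHATRA_LIST name with
  | some j => simp [hidx]
  | none => simp [hidx]
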